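-- pv_equiv track=rewrite | github.com/YandaQu/FIT2004_Algorithms_and_Data_structure | Assignment1/A1/A1/Scrabble.py | find_max_group
-- ===== SOURCE A (Python) =====
-- def find_max_group(a_list):
--     max_index = 0
--     max_num = 1
--     current_num = 0
--     current_index = 0
--     old = a_list[0][0]
--     # go through the list to check group of anagrams
--     for i in range(len(a_list)):
--         # check if still in same group, yes num plus one
--         if a_list[i][0] == old:
--             current_num += 1
--         else:
--             # in a new group, reset
--             current_num = 1
--             current_index = i
--         # always check if current group is the largest group
--         if current_num > max_num:
--             max_num = current_num
--             max_index = current_index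
--         old = a_list[i][0]
--     return a_list[max_index:max_index+max_num]
-- ===== SOURCE B (Python) =====
-- def find_max_group(a_list):
--     # split into consecutive runs sharing the first component, then take the first longest run
--     cur = a_list[0][0]          # raises IndexError on empty input, like A
--     runs = []
--     run = []
--     for item in a_list:
--         if item[0] == cur:
--             run.append(item)
--         else:
--             runs.append(run)
--             run = [item]
--             cur = item[0]
--     runs.append(run)
--     return max(runs, key=len)
-- ===== Notes on version B (the rewrite author's own statement) =====
-- stated objective: idiomatic
-- what changed: B replaces A's five-variable index/counter bookkeeping plus final slice by the groupby decomposition: split the list into consecutive runs sharing the first component, then return max(runs, key=len) (first longest run, matching A's strict-> tie rule).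
import Mathlib
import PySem

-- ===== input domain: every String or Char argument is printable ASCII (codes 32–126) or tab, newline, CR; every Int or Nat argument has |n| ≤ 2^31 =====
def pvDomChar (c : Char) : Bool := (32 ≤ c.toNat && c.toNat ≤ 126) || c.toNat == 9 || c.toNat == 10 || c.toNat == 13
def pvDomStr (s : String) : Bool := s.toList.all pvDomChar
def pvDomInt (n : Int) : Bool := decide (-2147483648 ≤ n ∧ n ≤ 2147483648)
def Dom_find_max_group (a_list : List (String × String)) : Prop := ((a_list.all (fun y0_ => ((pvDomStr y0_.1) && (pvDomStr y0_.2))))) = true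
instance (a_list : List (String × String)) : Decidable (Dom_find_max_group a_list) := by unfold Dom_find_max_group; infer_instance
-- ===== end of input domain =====

-- B replaces A's index/counter bookkeeping + final slice by the groupby decomposition: split
-- into consecutive runs sharing the first component, then take the first longest run.

-- ===== PORT A =====
-- loop body of A: state = (max_index, max_num, current_num, current_index, old)
def fmgStepA (st : Int × Int × Int × Int × String) (ix : Int × (String × String)) :
    Int × Int × Int × Int × String :=
  let cnci := if ix.2.1 == st.2.2.2.2 then (st.2.2.1 + 1, st.2.2.2.1) else (1, ix.1)
  let mnmi := if st.2.1 < cnci.1 then (cnci.1, cnci.2) else (st.2.1, st.1)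
  (mnmi.2, mnmi.1, cnci.1, cnci.2, ix.2.1)

def find_max_group (a_list : List (String × String)) : List (String × String) :=
  match PySem.List.pyGet? a_list 0 with
  | none => []        -- a_list[0][0] raises IndexError on []; excluded by Pre_
  | some p0 =>
      let st := (PySem.List.enumerate a_list 0).foldl fmgStepA (0, 1, 0, 0, p0.1)
      PySem.List.slice a_list (some st.1) (some (st.1 + st.2.1))

-- ===== PORT B =====
-- loop body of B: state = (cur, run, runs)
def fmgStepB (st : String × List (String × String) × List (List (String × String)))
    (x : String × String) : String × List (String × String) × List (List (String × String)) :=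
  if x.1 == st.1 then (st.1, st.2.1 ++ [x], st.2.2)
  else (x.1, [x], st.2.2 ++ [st.2.1])

def find_max_group_alt (a_list : List (String × String)) : List (String × String) :=
  match PySem.List.pyGet? a_list 0 with
  | none => []        -- a_list[0][0] raises IndexError on []; excluded by Pre_
  | some p0 =>
      let st := a_list.foldl fmgStepB (p0.1, [], [])
      match PySem.List.max? (st.2.2 ++ [st.2.1]) (fun r => r.length) with
      | none => []    -- unreachable: runs is nonempty after the final append
      | some r => r

-- ===== PRECONDITION & SPEC =====
-- Pre_ excludes only the empty list, on which both A and B raise IndexError at a_list[0][0].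
def Pre_find_max_group (a_list : List (String × String)) : Prop := a_list ≠ []
instance (a_list : List (String × String)) : Decidable (Pre_find_max_group a_list) := by unfold Pre_find_max_group; infer_instance
def pvWitness_find_max_group : (List (String × String)) := [("ab", "x"), ("ab", "y"), ("c", "z")]

def Spec_find_max_group (a_list : List (String × String)) (out : List (String × String)) : Prop := out = find_max_group_alt a_list
instance (a_list : List (String × String)) (out : List (String × String)) : Decidable (Spec_find_max_group a_list out) := by unfold Spec_find_max_group; infer_instance

-- ===== CLAIM (what is proved, stated in full; the proofs are below) =====
def Claim_equal_find_max_group : Prop := ∀ (a_list : List (String × String)), Dom_find_max_group a_list → Pre_find_max_group a_list → Spec_find_max_group a_list (find_max_group a_list)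

-- ===== LEMMAS AND PROOFS =====

-- result extraction on A's side (slice by final state) and B's side (first longest run)
def fmgA (full : List (String × String)) (st : Int × Int × Int × Int × String) :
    List (String × String) :=
  PySem.List.slice full (some st.1) (some (st.1 + st.2.1))

def fmgB (st : String × List (String × String) × List (List (String × String))) :
    List (String × String) :=
  match PySem.List.max? (st.2.2 ++ [st.2.1]) (fun r => r.length) with
  | none => []
  | some r => r

theorem fmg_max_snoc {α : Type} (L : List α) (r : α) (k : α → Nat) :
    PySem.List.max? (L ++ [r]) k =
      match PySem.List.max? L k with
      | none => some r
      | some m => if k m < k r then some r else some m := by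
  simp only [PySem.List.max?, List.foldl_append, List.foldl_cons, List.foldl_nil]
  rfl

theorem fmg_drop_take (pre run rest : List (String × String)) :
    ((pre ++ run ++ rest).drop pre.length).take run.length = run := by
  rw [List.append_assoc, List.drop_left, List.take_left]

-- main loop invariant: from matching mid-loop states, A's remaining loop + slice
-- and B's remaining loop + first-longest-run produce the same list.
theorem fmg_main :
    ∀ (rest : List (String × String)) (pre run : List (String × String))
      (acc : List (List (String × String))) (cur : String) (mi mn : Nat)
      (full : List (String × String)),
      full = pre ++ run ++ rest →
      run ≠ [] →
      ((mi = pre.length ∧ mn = run.length ∧ ∀ r ∈ acc, r.length < run.length) ∨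
       (∃ m, PySem.List.max? acc (fun r => r.length) = some m ∧ m.length = mn ∧
          run.length ≤ mn ∧ (full.drop mi).take mn = m)) →
      fmgA full ((PySem.List.enumerate rest ((pre.length : Int) + (run.length : Int))).foldl
          fmgStepA ((mi : Int), (mn : Int), (run.length : Int), (pre.length : Int), cur))
        = fmgB (rest.foldl fmgStepB (cur, run, acc)) := by
  intro rest
  induction rest with
  | nil =>
    intro pre run acc cur mi mn full hfull hrun hC
    simp only [PySem.List.enumerate, List.foldl_nil, fmgA, fmgB]
    rw [PySem.List.slice_natCast_add]
    rcases hC with ⟨h1, h2, h3⟩ | ⟨m, hm, hlen, hle, hsl⟩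
    · subst h1; subst h2; subst hfull
      rw [fmg_max_snoc]
      cases hq : PySem.List.max? acc (fun r => r.length) with
      | none => simp only [fmg_drop_take]
      | some m' =>
        have hlt := h3 m' (PySem.List.max?_mem hq)
        simp only [if_pos hlt, fmg_drop_take]
    · rw [fmg_max_snoc, hm]
      have hng : ¬ (m.length < run.length) := by omega
      simp only [hng, if_false]
      exact hsl
  | cons x rest ih =>
    intro pre run acc cur mi mn full hfull hrun hC
    have hmn1 : 1 ≤ mn := by
      have hr1 : 1 ≤ run.length := by
        cases run with | nil => exact absurd rfl hrun | cons a t => simp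
      rcases hC with ⟨_, h2, _⟩ | ⟨m, _, _, hle, _⟩ <;> omega
    rw [PySem.List.enumerate_cons, List.foldl_cons, List.foldl_cons]
    by_cases heq : x.1 = cur
    · -- same run continues
      have hbeq : (x.1 == cur) = true := beq_iff_eq.mpr heq
      by_cases hlt : mn < run.length + 1
      · -- new best: the current run
        have hlt' : ((mn : Int) < (run.length : Int) + 1) := by omega
        have : fmgStepA ((mi : Int), (mn : Int), (run.length : Int), (pre.length : Int), cur)
            (((pre.length : Int) + (run.length : Int)), x)
            = ((pre.length : Int), ((run.length : Int) + 1), ((run.length : Int) + 1),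
               (pre.length : Int), x.1) := by
          simp [fmgStepA, hbeq, hlt']
        rw [this]
        have hB : fmgStepB (cur, run, acc) x = (cur, run ++ [x], acc) := by
          simp [fmgStepB, hbeq]
        rw [hB, heq]
        have := ih pre (run ++ [x]) acc cur pre.length (run.length + 1) full
          (by simpa using hfull) (by simp)
          (Or.inl ⟨rfl, by simp, ?_⟩)
        · simp only [List.length_append, List.length_cons, List.length_nil, Nat.zero_add] at this
          push_cast at this
          rw [add_assoc]
          exact this
        · intro r hr
          rcases hC with ⟨_, h2, h3⟩ | ⟨m, hm, hlen, hle, _⟩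
          · have := h3 r hr; simp; omega
          · have := PySem.List.max?_isMax hm r hr; simp; omega
      · -- current run not (yet) better
        have hle' : run.length + 1 ≤ mn := by omega
        have hlt' : ¬ ((mn : Int) < (run.length : Int) + 1) := by omega
        have : fmgStepA ((mi : Int), (mn : Int), (run.length : Int), (pre.length : Int), cur)
            (((pre.length : Int) + (run.length : Int)), x)
            = ((mi : Int), (mn : Int), ((run.length : Int) + 1),
               (pre.length : Int), x.1) := by
          simp [fmgStepA, hbeq, hlt']
        rw [this]
        have hB : fmgStepB (cur, run, acc) x = (cur, run ++ [x], acc) := by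
          simp [fmgStepB, hbeq]
        rw [hB, heq]
        rcases hC with ⟨_, h2, _⟩ | ⟨m, hm, hlen, hle, hsl⟩
        · omega
        have := ih pre (run ++ [x]) acc cur mi mn full
          (by simpa using hfull) (by simp)
          (Or.inr ⟨m, hm, hlen, by simp; omega, hsl⟩)
        simp only [List.length_append, List.length_cons, List.length_nil, Nat.zero_add] at this
        push_cast at this
        rw [add_assoc]
        exact this
    · -- a new run starts
      have hbeq : (x.1 == cur) = false := by simpa using heq
      have hnot : ¬ ((mn : Int) < 1) := by omega
      have : fmgStepA ((mi : Int), (mn : Int), (run.length : Int), (pre.length : Int), cur)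
          (((pre.length : Int) + (run.length : Int)), x)
          = ((mi : Int), (mn : Int), (1 : Int),
             ((pre.length : Int) + (run.length : Int)), x.1) := by
        simp [fmgStepA, hbeq, hnot]
      rw [this]
      have hB : fmgStepB (cur, run, acc) x = (x.1, [x], acc ++ [run]) := by
        simp [fmgStepB, hbeq]
      rw [hB]
      have hm' : ∃ m, PySem.List.max? (acc ++ [run]) (fun r => r.length) = some m ∧
          m.length = mn ∧ ([x] : List (String × String)).length ≤ mn ∧
          (full.drop mi).take mn = m := by
        rcases hC with ⟨h1, h2, h3⟩ | ⟨m, hm, hlen, hle, hsl⟩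
        · refine ⟨run, ?_, h2.symm, by simpa using hmn1, ?_⟩
          · rw [fmg_max_snoc]
            cases hq : PySem.List.max? acc (fun r => r.length) with
            | none => simp
            | some m' => simp only [h3 m' (PySem.List.max?_mem hq), if_true]
          · subst h1; subst h2; subst hfull; exact fmg_drop_take ..
        · refine ⟨m, ?_, hlen, by simpa using hmn1, hsl⟩
          rw [fmg_max_snoc, hm]
          have hng : ¬ (m.length < run.length) := by omega
          simp only [hng, if_false]
      have := ih (pre ++ run) [x] (acc ++ [run]) x.1 mi mn full
        (by simp [hfull]) (by simp) (Or.inr hm')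
      simp only [List.length_append, List.length_cons, List.length_nil, Nat.zero_add] at this
      push_cast at this
      exact this

theorem find_max_group_spec : Claim_equal_find_max_group := by
  unfold Claim_equal_find_max_group
  intro a_list _ hpre
  unfold Spec_find_max_group
  cases a_list with
  | nil => exact absurd rfl hpre
  | cons p0 tl =>
    show find_max_group (p0 :: tl) = find_max_group_alt (p0 :: tl)
    have h0 : PySem.List.pyGet? (p0 :: tl) 0 = some p0 := by
      simp [PySem.List.pyGet?, PySem.List.pyIdx?]
    have hA1 : fmgStepA (0, 1, 0, 0, p0.1) (0, p0) = (0, 1, 1, 0, p0.1) := by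
      simp [fmgStepA]
    have hB1 : fmgStepB (p0.1, [], []) p0 = (p0.1, [p0], []) := by
      simp [fmgStepB]
    have main := fmg_main tl [] [p0] [] p0.1 0 1 (p0 :: tl)
      (by simp) (by simp) (Or.inl ⟨by simp, by simp, by simp⟩)
    simp only [find_max_group, find_max_group_alt, h0]
    rw [PySem.List.enumerate_cons, List.foldl_cons, List.foldl_cons, hA1, hB1]
    simpa [fmgA, fmgB] using main
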